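-- pv_equiv track=rewrite | github.com/MASITH-developpement/azalcoffre | moteur/autopilot/analyzers.py | _get_smart_default
-- ===== SOURCE A (Python) =====
-- def _get_smart_default(column_name: str) -> str:
--     """Retourne une valeur par défaut intelligente basée sur le nom de colonne."""
--     name = column_name.lower()
--
--     # Texte / titres
--     if any(x in name for x in ['titre', 'title', 'name', 'nom', 'label']):
--         return "'Sans titre'"
--     if any(x in name for x in ['description', 'notes', 'comment', 'remarque']):
--         return "''"
--     # Statut
--     if 'statut' in name or 'status' in name:
--         return "'BROUILLON'"
--     if 'etat' in name or 'state' in name: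
--         return "'ACTIF'"
--     # Civilité
--     if 'civilite' in name:
--         return "''"
--     # Référence / code
--     if any(x in name for x in ['reference', 'code', 'ref']):
--         return "''"
--     # Montants
--     if any(x in name for x in ['montant', 'prix', 'total', 'amount', 'price', 'cout']):
--         return "0"
--     # Quantités
--     if any(x in name for x in ['quantite', 'qty', 'nombre', 'count', 'duree']):
--         return "0"
--     # Booléens
--     if any(x in name for x in ['is_', 'has_', 'actif', 'active', 'enabled', 'visible']):
--         return "false"
--     # Email / contact
--     if any(x in name for x in ['email', 'mail', 'telephone', 'tel', 'phone']):
--         return "''"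
--     # Type / catégorie
--     if any(x in name for x in ['type', 'categorie', 'category']):
--         return "'AUTRE'"
--     # Adresse
--     if any(x in name for x in ['adresse', 'address', 'ville', 'city', 'pays', 'country']):
--         return "''"
--
--     # Défaut générique
--     return "''"
-- ===== SOURCE B (Python) =====
-- # Inverted index: instead of scanning the name once per keyword, scan the
-- # substrings of the name once and hash-look each up in a keyword table that
-- # maps it to the precedence rank of its rule group; the best (lowest) rank
-- # picks the default.
-- _PRIO = {
--     'titre': 0, 'title': 0, 'name': 0, 'nom': 0, 'label': 0,
--     'description': 1, 'notes': 1, 'comment': 1, 'remarque': 1,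
--     'statut': 2, 'status': 2,
--     'etat': 3, 'state': 3,
--     'civilite': 4,
--     'reference': 5, 'code': 5, 'ref': 5,
--     'montant': 6, 'prix': 6, 'total': 6, 'amount': 6, 'price': 6, 'cout': 6,
--     'quantite': 7, 'qty': 7, 'nombre': 7, 'count': 7, 'duree': 7,
--     'is_': 8, 'has_': 8, 'actif': 8, 'active': 8, 'enabled': 8, 'visible': 8,
--     'email': 9, 'mail': 9, 'telephone': 9, 'tel': 9, 'phone': 9,
--     'type': 10, 'categorie': 10, 'category': 10,
--     'adresse': 11, 'address': 11, 'ville': 11, 'city': 11, 'pays': 11, 'country': 11,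
-- }
-- _VALUES = ["'Sans titre'", "''", "'BROUILLON'", "'ACTIF'", "''", "''",
--            "0", "0", "false", "''", "'AUTRE'", "''"]
--
--
-- def _get_smart_default(column_name: str) -> str:
--     name = column_name.lower()
--     hits = [_PRIO[name[i:j]]
--             for i in range(len(name))
--             for j in range(i + 1, i + 12)
--             if name[i:j] in _PRIO]
--     return _VALUES[min(hits)] if hits else "''"
-- ===== Notes on version B (the rewrite author's own statement) =====
-- stated objective: alternative
-- what changed: Inverts the search: instead of scanning the name once per keyword through a 12-branch cascade, B enumerates the substrings of the name (length <= 11) once, hash-looks each up in a keyword->precedence-rank dict, and returns the value of the minimal rank found.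
import Mathlib
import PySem

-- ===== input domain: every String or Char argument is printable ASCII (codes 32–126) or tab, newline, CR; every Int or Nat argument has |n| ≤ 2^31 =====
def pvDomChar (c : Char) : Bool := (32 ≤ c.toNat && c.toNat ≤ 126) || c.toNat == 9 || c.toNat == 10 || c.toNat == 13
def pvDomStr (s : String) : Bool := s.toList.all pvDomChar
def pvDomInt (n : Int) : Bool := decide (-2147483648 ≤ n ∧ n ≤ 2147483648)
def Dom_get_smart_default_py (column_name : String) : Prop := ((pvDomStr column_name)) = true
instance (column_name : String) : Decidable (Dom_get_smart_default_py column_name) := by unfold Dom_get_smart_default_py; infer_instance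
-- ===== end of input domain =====

-- B inverts the search: it enumerates the substrings of the lowercased name once and
-- hash-looks each up in a keyword->precedence-rank dict, returning the value of the
-- minimal rank found (objective: alternative; same return value, no speed claim).


-- ===== PORT A =====
def get_smart_default_py (column_name : String) : String :=
  let name := PySem.Str.lower column_name
  if ["titre", "title", "name", "nom", "label"].any (fun x => PySem.Str.isIn x name) then "'Sans titre'"
  else if ["description", "notes", "comment", "remarque"].any (fun x => PySem.Str.isIn x name) then "''"
  else if PySem.Str.isIn "statut" name || PySem.Str.isIn "status" name then "'BROUILLON'"
  else if PySem.Str.isIn "etat" name || PySem.Str.isIn "state" name then "'ACTIF'"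
  else if PySem.Str.isIn "civilite" name then "''"
  else if ["reference", "code", "ref"].any (fun x => PySem.Str.isIn x name) then "''"
  else if ["montant", "prix", "total", "amount", "price", "cout"].any (fun x => PySem.Str.isIn x name) then "0"
  else if ["quantite", "qty", "nombre", "count", "duree"].any (fun x => PySem.Str.isIn x name) then "0"
  else if ["is_", "has_", "actif", "active", "enabled", "visible"].any (fun x => PySem.Str.isIn x name) then "false"
  else if ["email", "mail", "telephone", "tel", "phone"].any (fun x => PySem.Str.isIn x name) then "''"
  else if ["type", "categorie", "category"].any (fun x => PySem.Str.isIn x name) then "'AUTRE'"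
  else if ["adresse", "address", "ville", "city", "pays", "country"].any (fun x => PySem.Str.isIn x name) then "''"
  else "''"

-- ===== PORT B =====
-- the dict literal _PRIO of Source B (keyword -> precedence rank of its rule group)
def pvPrio : PySem.Dict String Nat := PySem.Dict.mk
  [ ("titre", 0), ("title", 0), ("name", 0), ("nom", 0), ("label", 0),
    ("description", 1), ("notes", 1), ("comment", 1), ("remarque", 1),
    ("statut", 2), ("status", 2),
    ("etat", 3), ("state", 3),
    ("civilite", 4),
    ("reference", 5), ("code", 5), ("ref", 5),
    ("montant", 6), ("prix", 6), ("total", 6), ("amount", 6), ("price", 6), ("cout", 6),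
    ("quantite", 7), ("qty", 7), ("nombre", 7), ("count", 7), ("duree", 7),
    ("is_", 8), ("has_", 8), ("actif", 8), ("active", 8), ("enabled", 8), ("visible", 8),
    ("email", 9), ("mail", 9), ("telephone", 9), ("tel", 9), ("phone", 9),
    ("type", 10), ("categorie", 10), ("category", 10),
    ("adresse", 11), ("address", 11), ("ville", 11), ("city", 11), ("pays", 11), ("country", 11) ]

-- the list literal _VALUES of Source B (rank -> default value)
def pvValues : List String :=
  ["'Sans titre'", "''", "'BROUILLON'", "'ACTIF'", "''", "''", "0", "0", "false", "''", "'AUTRE'", "''"]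

-- the comprehension 'hits' of Source B: the guard "name[i:j] in _PRIO" plus the lookup
-- "_PRIO[name[i:j]]" are ported together as one filterMap over the dict lookup
def pvHits (name : String) : List Nat :=
  (PySem.List.pyRange 0 (PySem.Str.len name) 1).flatMap (fun i =>
    (PySem.List.pyRange (i + 1) (i + 12) 1).filterMap (fun j =>
      PySem.Dict.get? pvPrio (PySem.Str.slice name (some i) (some j))))

def get_smart_default_py_alt (column_name : String) : String :=
  let name := PySem.Str.lower column_name
  match PySem.List.min? (pvHits name) (fun x => x) with
  | none => "''"
  | some p => PySem.List.pyGetD pvValues (p : Int) "''"   -- _VALUES[min(hits)]; index provably in range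

-- ===== PRECONDITION & SPEC =====
def Spec_get_smart_default_py (column_name : String) (out : String) : Prop := out = get_smart_default_py_alt column_name
instance (column_name : String) (out : String) : Decidable (Spec_get_smart_default_py column_name out) := by unfold Spec_get_smart_default_py; infer_instance

-- ===== CLAIM (what is proved, stated in full; the proofs are below) =====
def Claim_equal_get_smart_default_py : Prop := ∀ (column_name : String), Dom_get_smart_default_py column_name → Spec_get_smart_default_py column_name (get_smart_default_py column_name)

-- ===== LEMMAS AND PROOFS =====

-- the keyword group of rank p (A's branch p tests exactly these keywords)
def pvGroup (p : Nat) : List String :=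
  [ ["titre", "title", "name", "nom", "label"],
    ["description", "notes", "comment", "remarque"],
    ["statut", "status"],
    ["etat", "state"],
    ["civilite"],
    ["reference", "code", "ref"],
    ["montant", "prix", "total", "amount", "price", "cout"],
    ["quantite", "qty", "nombre", "count", "duree"],
    ["is_", "has_", "actif", "active", "enabled", "visible"],
    ["email", "mail", "telephone", "tel", "phone"],
    ["type", "categorie", "category"],
    ["adresse", "address", "ville", "city", "pays", "country"] ].getD p []

def pvMatched (p : Nat) (name : String) : Bool :=
  (pvGroup p).any (fun k => PySem.Str.isIn k name)

-- a successful first-match lookup in an association-list dict is a member of the list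
theorem pv_get?_mem {κ ν : Type} [BEq κ] [LawfulBEq κ] (l : List (κ × ν)) (k : κ) (v : ν)
    (h : (PySem.Dict.mk l).get? k = some v) : (k, v) ∈ l := by
  induction l with
  | nil => simp [PySem.Dict.get?] at h
  | cons hd tl ih =>
    rw [PySem.Dict.get?_mk_cons] at h
    by_cases hk : hd.1 == k
    · simp [hk] at h
      obtain ⟨a, b⟩ := hd
      have ha : a = k := by simpa using hk
      simp at h
      simp [ha, h]
    · simp [hk] at h
      exact List.mem_cons_of_mem _ (ih h)

theorem pv_helper (name k : String) (p : Nat)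
    (hget : PySem.Dict.get? pvPrio k = some p)
    (h1 : 1 ≤ k.toList.length) (h2 : k.toList.length ≤ 11)
    (hIn : PySem.Str.isIn k name = true) : p ∈ pvHits name := by
  have hIn' := (PySem.Str.isIn_iff_infix k name).mp hIn
  obtain ⟨j, hpre⟩ := (PySem.Chars.exists_prefix_drop_iff_isIn k.toList name.toList).mpr
    ((PySem.Chars.isIn_iff_infix _ _).mpr hIn')
  have hjlt : j < name.toList.length := by
    by_contra hge
    rw [List.drop_eq_nil_of_le (by omega)] at hpre
    have := hpre.length_le
    simp only [List.length_nil] at this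
    omega
  have htake : (name.toList.drop j).take k.toList.length = k.toList :=
    (List.prefix_iff_eq_take.mp hpre).symm
  have hslice : PySem.Str.slice name (some (j : Int)) (some ((j : Int) + (k.toList.length : Int))) = k := by
    apply String.toList_injective
    rw [PySem.Str.toList_slice, PySem.Chars.slice_eq_listSlice, PySem.List.slice_natCast_add]
    exact htake
  refine List.mem_flatMap.mpr ⟨(j : Int), ?_, List.mem_filterMap.mpr
    ⟨(j : Int) + (k.toList.length : Int), ?_, ?_⟩⟩
  · rw [PySem.List.mem_pyRange_one]
    have hlenl : name.toList.length = name.length := String.length_toList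
    constructor
    · exact_mod_cast Int.natCast_nonneg j
    · simp
      omega
  · rw [PySem.List.mem_pyRange_one]
    omega
  · rw [hslice]
    exact hget


theorem pv_mem_hits (name : String) (p : Nat) :
    p ∈ pvHits name ↔ pvMatched p name = true := by
  constructor
  · intro hp
    obtain ⟨i, hi, hj⟩ := List.mem_flatMap.mp hp
    obtain ⟨j, hj', hget⟩ := List.mem_filterMap.mp hj
    rw [PySem.List.mem_pyRange_one] at hi hj'
    have hi0 : 0 ≤ i := hi.1
    have hj0 : 0 ≤ j := by omega
    have hInfix : (PySem.Str.slice name (some i) (some j)).toList <:+: name.toList := by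
      rw [PySem.Str.toList_slice, PySem.Chars.slice_eq_listSlice, PySem.List.slice_toNat]
      exacts [((List.take_prefix _ _).isInfix).trans ((List.drop_suffix _ _).isInfix), hi0, hj0]
    have hIn : PySem.Str.isIn (PySem.Str.slice name (some i) (some j)) name = true :=
      (PySem.Str.isIn_iff_infix _ _).mpr hInfix
    generalize hgen : PySem.Str.slice name (some i) (some j) = s at hget hIn
    have hmem := pv_get?_mem _ _ _ hget
    simp only [List.mem_cons, List.not_mem_nil, or_false, Prod.mk.injEq] at hmem
    rcases hmem with ⟨rfl, rfl⟩|⟨rfl, rfl⟩|⟨rfl, rfl⟩|⟨rfl, rfl⟩|⟨rfl, rfl⟩|⟨rfl, rfl⟩|⟨rfl, rfl⟩|⟨rfl, rfl⟩|⟨rfl, rfl⟩|⟨rfl, rfl⟩|⟨rfl, rfl⟩|⟨rfl, rfl⟩|⟨rfl, rfl⟩|⟨rfl, rfl⟩|⟨rfl, rfl⟩|⟨rfl, rfl⟩|⟨rfl, rfl⟩|⟨rfl, rfl⟩|⟨rfl, rfl⟩|⟨rfl, rfl⟩|⟨rfl, rfl⟩|⟨rfl, rfl⟩|⟨rfl,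 rfl⟩|⟨rfl, rfl⟩|⟨rfl, rfl⟩|⟨rfl, rfl⟩|⟨rfl, rfl⟩|⟨rfl, rfl⟩|⟨rfl, rfl⟩|⟨rfl, rfl⟩|⟨rfl, rfl⟩|⟨rfl, rfl⟩|⟨rfl, rfl⟩|⟨rfl, rfl⟩|⟨rfl, rfl⟩|⟨rfl, rfl⟩|⟨rfl, rfl⟩|⟨rfl, rfl⟩|⟨rfl, rfl⟩|⟨rfl, rfl⟩|⟨rfl, rfl⟩|⟨rfl, rfl⟩|⟨rfl, rfl⟩|⟨rfl, rfl⟩|⟨rfl, rfl⟩|⟨rfl, rfl⟩|⟨rfl, rfl⟩|⟨rfl, rfl⟩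
    all_goals simp_all [pvMatched, pvGroup]
  · intro hm
    obtain ⟨k, hk, hIn⟩ := List.any_eq_true.mp hm
    have hp12 : p < 12 := by
      by_contra hge
      rw [show pvGroup p = [] from List.getD_eq_default _ _ (by simp; omega)] at hk
      simp at hk
    interval_cases p <;> simp only [pvGroup, List.getD] at hk <;>
      fin_cases hk <;> exact pv_helper name _ _ (by decide) (by decide) (by decide) hIn


theorem pv_min_hits (name : String) (g : Nat) (hg : pvMatched g name = true)
    (hlt : ∀ q < g, pvMatched q name = false) :
    PySem.List.min? (pvHits name) (fun x => x) = some g := by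
  cases h : PySem.List.min? (pvHits name) (fun x => x) with
  | none =>
    rw [PySem.List.min?_eq_none_iff] at h
    exact absurd ((pv_mem_hits name g).mpr hg) (by simp [h])
  | some m =>
    have hmem : m ∈ pvHits name := PySem.List.min?_mem h
    have hmin : m ≤ g := PySem.List.min?_isMin h g ((pv_mem_hits name g).mpr hg)
    have hM : pvMatched m name = true := (pv_mem_hits name m).mp hmem
    have : ¬ m < g := fun hc => by simp [hlt m hc] at hM
    have : m = g := by omega
    simp [this]

theorem pv_hits_nil (name : String) (h : ∀ q < 12, pvMatched q name = false) :
    PySem.List.min? (pvHits name) (fun x => x) = none := by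
  rw [PySem.List.min?_eq_none_iff]
  rw [List.eq_nil_iff_forall_not_mem]
  intro p hp
  have hm := (pv_mem_hits name p).mp hp
  by_cases hlt : p < 12
  · simp [h p hlt] at hm
  · have : pvGroup p = [] := by
      unfold pvGroup
      exact List.getD_eq_default _ _ (by simp; omega)
    simp [pvMatched, this] at hm

-- ===== VERDICT (by name: the statement is the Claim_ definition above) =====
set_option maxHeartbeats 2000000 in
theorem get_smart_default_py_spec : Claim_equal_get_smart_default_py := by
  intro column_name _
  unfold Spec_get_smart_default_py
  simp only [get_smart_default_py, get_smart_default_py_alt]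
  set name := PySem.Str.lower column_name with hname
  by_cases h0 : (["titre", "title", "name", "nom", "label"].any (fun x => PySem.Str.isIn x name)) = true
  · rw [if_pos h0, pv_min_hits name 0 (by simpa [pvMatched, pvGroup] using h0)
      (by intro q hq; omega)]
    simp [pvValues, PySem.List.pyGetD]
  rw [if_neg h0]
  by_cases h1 : (["description", "notes", "comment", "remarque"].any (fun x => PySem.Str.isIn x name)) = true
  · rw [if_pos h1, pv_min_hits name 1 (by simpa [pvMatched, pvGroup] using h1)
      (by intro q hq; interval_cases q; simp_all [pvMatched, pvGroup])]
    simp [pvValues, PySem.List.pyGetD]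
  rw [if_neg h1]
  by_cases h2 : (PySem.Str.isIn "statut" name || PySem.Str.isIn "status" name) = true
  · rw [if_pos h2, pv_min_hits name 2 (by simpa [pvMatched, pvGroup] using h2)
      (by intro q hq; interval_cases q <;> simp_all [pvMatched, pvGroup])]
    simp [pvValues, PySem.List.pyGetD]
  rw [if_neg h2]
  by_cases h3 : (PySem.Str.isIn "etat" name || PySem.Str.isIn "state" name) = true
  · rw [if_pos h3, pv_min_hits name 3 (by simpa [pvMatched, pvGroup] using h3)
      (by intro q hq; interval_cases q <;> simp_all [pvMatched, pvGroup])]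
    simp [pvValues, PySem.List.pyGetD]
  rw [if_neg h3]
  by_cases h4 : (PySem.Str.isIn "civilite" name) = true
  · rw [if_pos h4, pv_min_hits name 4 (by simpa [pvMatched, pvGroup] using h4)
      (by intro q hq; interval_cases q <;> simp_all [pvMatched, pvGroup])]
    simp [pvValues, PySem.List.pyGetD]
  rw [if_neg h4]
  by_cases h5 : (["reference", "code", "ref"].any (fun x => PySem.Str.isIn x name)) = true
  · rw [if_pos h5, pv_min_hits name 5 (by simpa [pvMatched, pvGroup] using h5)
      (by intro q hq; interval_cases q <;> simp_all [pvMatched, pvGroup])]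
    simp [pvValues, PySem.List.pyGetD]
  rw [if_neg h5]
  by_cases h6 : (["montant", "prix", "total", "amount", "price", "cout"].any (fun x => PySem.Str.isIn x name)) = true
  · rw [if_pos h6, pv_min_hits name 6 (by simpa [pvMatched, pvGroup] using h6)
      (by intro q hq; interval_cases q <;> simp_all [pvMatched, pvGroup])]
    simp [pvValues, PySem.List.pyGetD]
  rw [if_neg h6]
  by_cases h7 : (["quantite", "qty", "nombre", "count", "duree"].any (fun x => PySem.Str.isIn x name)) = true
  · rw [if_pos h7, pv_min_hits name 7 (by simpa [pvMatched, pvGroup] using h7)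
      (by intro q hq; interval_cases q <;> simp_all [pvMatched, pvGroup])]
    simp [pvValues, PySem.List.pyGetD]
  rw [if_neg h7]
  by_cases h8 : (["is_", "has_", "actif", "active", "enabled", "visible"].any (fun x => PySem.Str.isIn x name)) = true
  · rw [if_pos h8, pv_min_hits name 8 (by simpa [pvMatched, pvGroup] using h8)
      (by intro q hq; interval_cases q <;> simp_all [pvMatched, pvGroup])]
    simp [pvValues, PySem.List.pyGetD]
  rw [if_neg h8]
  by_cases h9 : (["email", "mail", "telephone", "tel", "phone"].any (fun x => PySem.Str.isIn x name)) = true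
  · rw [if_pos h9, pv_min_hits name 9 (by simpa [pvMatched, pvGroup] using h9)
      (by intro q hq; interval_cases q <;> simp_all [pvMatched, pvGroup])]
    simp [pvValues, PySem.List.pyGetD]
  rw [if_neg h9]
  by_cases h10 : (["type", "categorie", "category"].any (fun x => PySem.Str.isIn x name)) = true
  · rw [if_pos h10, pv_min_hits name 10 (by simpa [pvMatched, pvGroup] using h10)
      (by intro q hq; interval_cases q <;> simp_all [pvMatched, pvGroup])]
    simp [pvValues, PySem.List.pyGetD]
  rw [if_neg h10]
  by_cases h11 : (["adresse", "address", "ville", "city", "pays", "country"].any (fun x => PySem.Str.isIn x name)) = true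
  · rw [if_pos h11, pv_min_hits name 11 (by simpa [pvMatched, pvGroup] using h11)
      (by intro q hq; interval_cases q <;> simp_all [pvMatched, pvGroup])]
    simp [pvValues, PySem.List.pyGetD]
  rw [if_neg h11]
  rw [pv_hits_nil name (by intro q hq; interval_cases q <;> simp_all [pvMatched, pvGroup])]
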